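-- pv_equiv track=rewrite | github.com/Krapoviche/happy-cube-solver | happy_cube.py | flipPieceInPlace
-- ===== SOURCE A (Python) =====
-- def getArrete(piece, numArrete):
--     # Special treatment for the last edge because of it's last bit being actually the first of the piece
--     if numArrete == 4 :
--         # Making every bit that isn't the 4 lasts
--         mask = (1 << 4) - 1
--
--         # Get the first bit
--         firstBit = piece >> 15
--
--         # Compute the edge
--         res = piece & mask
--         return (res << 1) + firstBit
--
--     # For other edges, we create a mask that will keep every bits on the right from the first to the one starting the edge the user is asking for
--     masque = (1 << (4 + (4* (4-numArrete)))) - 1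
--
--     # Then we apply this mask and shift the result to the right until the end of the edge
--     return (piece & masque) >> (4* (4-numArrete) - 1 )
--
-- def flipPiece(edges):
--     flippedEdges = []
--
--     # For each edge
--     for edge in edges:
--         # Start to build the new one
--         reversedArrete = ["0","b"]
--
--         # Reverse the edge
--         for i in range(len(bin(edge)) -1,1,-1):
--             reversedArrete.append(bin(edge)[i])
--
--         # Complete the potentially lost zeros
--         while len(reversedArrete) < 5 + 2 :
--             reversedArrete.append("0")
--
--         # Translation to an int and append it to flippedEdges
--         flippedEdges.append(int("".join(reversedArrete)[2:],2))
--
--     # Switch top and bottom edges (horizontall flip)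
--     flippedEdges[0],flippedEdges[2] = flippedEdges[2],flippedEdges[0]
--
--     return flippedEdges
--
-- def flipPieceInPlace(piece):
--
--     # Getting flipped edges from another function
--     flippedEdges = getEdges(piece)[4:]
--     flippedPiece  = []
--
--     # For each flipped edge
--     for i in flippedEdges:
--         # Complete it with zeros (to be sure it's 5 bits long)
--         for j in range(len(bin(i).replace("0b","")),5):
--             flippedPiece.append("0")
--
--         # Append actual bits of the edge to the piece
--         for j in bin(i).replace("0b",""):
--             flippedPiece.append(j)
--
--         # Then remove the last one so the next edge will not double it
--         flippedPiece.pop()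
--
--     return (int("".join(flippedPiece),2))
--
-- def getEdges(piece):
--     arretes = []
--
--     # Adding edges before flipping
--     for i in range(1,5):
--         arretes.append(getArrete(piece,i))
--
--     flippedPiece = flipPiece(arretes)
--
--     # Adding edges after flipping
--     for i in flippedPiece:
--         arretes.append(i)
--
--     return arretes
-- ===== SOURCE B (Python) =====
-- def _rev5(e):
--     # reverse the low 5 bits of e
--     r = 0
--     for _ in range(5):
--         r = r * 2 + e % 2
--         e //= 2
--     return r
--
-- def flipPieceInPlace(piece):
--     # the four 5-bit edges of the piece (each sharing a corner bit with the next)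
--     top    = piece % 65536 // 2048
--     right  = piece % 4096 // 128
--     bottom = piece % 256 // 8
--     left   = piece % 16 * 2 + piece // 32768
--     # horizontal flip: every edge is read backwards and top/bottom swap places
--     flipped = [_rev5(bottom), _rev5(right), _rev5(top), _rev5(left)]
--     # reassemble the 16-bit piece, 4 bits per edge (the 5th bit belongs to the next edge)
--     out = 0
--     for r in flipped:
--         out = out * 16 + r // 2
--     return out
-- ===== Notes on version B (the rewrite author's own statement) =====
-- stated objective: simpler
-- what changed: Replaces A's bin()-string building, slicing, reversing and int(s,2) re-parsing pipeline (getEdges/flipPiece/string loops) by pure integer arithmetic over the 16-bit cube format: extract the four 5-bit edges with mod/div, reverse each edge's 5 bits with an arithmetic loop, swap top and bottom, and reassemble with one accumulator loop. …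
-- outside the precondition, e.g. on flipPieceInPlace(98319): A returns 65552, B returns 32776; on flipPieceInPlace(-32768): A raises ValueError, B returns 15
import Mathlib
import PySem

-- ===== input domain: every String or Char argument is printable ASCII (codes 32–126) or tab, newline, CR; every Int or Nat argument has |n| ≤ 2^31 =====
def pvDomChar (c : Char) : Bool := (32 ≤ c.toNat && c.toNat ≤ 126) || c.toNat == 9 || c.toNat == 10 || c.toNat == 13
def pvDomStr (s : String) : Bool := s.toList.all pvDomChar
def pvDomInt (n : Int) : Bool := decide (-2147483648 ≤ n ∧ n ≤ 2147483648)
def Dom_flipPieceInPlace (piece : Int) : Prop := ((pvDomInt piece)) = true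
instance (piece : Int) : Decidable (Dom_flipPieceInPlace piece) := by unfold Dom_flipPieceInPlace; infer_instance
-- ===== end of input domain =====

-- B replaces A's bin()/string-slicing edge flipping by fixed-width integer arithmetic (objective: simpler).

-- ===== PORT A =====
-- A-side helpers: bin(), int(s, 2) and the while-padding loop, ported by hand.

-- digits of bin(n) after the '0b' prefix, for n > 0 (big-endian, no leading zeros); [] for n = 0
-- (structural recursion on a fuel bound ≥ n, so the kernel can evaluate it)
def pvBinDigitsF : Nat → Nat → List Char
  | 0, _ => []
  | f + 1, n => if n = 0 then [] else pvBinDigitsF f (n / 2) ++ [if n % 2 = 1 then '1' else '0']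

def pvBinDigits (n : Nat) : List Char := pvBinDigitsF n n

-- bin(i) as a char list (exact: '-0b…' for negative, '0b0' for zero)
def pvBin (i : Int) : List Char :=
  if i < 0 then '-' :: '0' :: 'b' :: pvBinDigits i.natAbs
  else if i = 0 then ['0', 'b', '0']
  else '0' :: 'b' :: pvBinDigits i.toNat

-- bin(i).replace("0b","") as a char list (exact: the prefix '0b' is the only occurrence)
def pvBinRep (i : Int) : List Char :=
  if i < 0 then '-' :: pvBinDigits i.natAbs
  else if i = 0 then ['0']
  else pvBinDigits i.toNat

-- value of a binary digit string (helper for int(s, 2))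
def pvBitVal (l : List Char) : Nat := l.foldl (fun a c => 2 * a + (if c = '1' then 1 else 0)) 0

-- int(''.join(l), 2): none = ValueError (exact on the strings this program builds: only '0','1','b','-' occur)
def pvParseBin (l : List Char) : Option Int :=
  if l ≠ [] ∧ l.all (fun c => c == '0' || c == '1') then some ((pvBitVal l : Int)) else none

-- while len(l) < 5 + 2: l.append("0")  (at most 7 iterations, run on a fuel of 7)
def pvPadTo7F : Nat → List Char → List Char
  | 0, l => l
  | f + 1, l => if l.length < 7 then pvPadTo7F f (l ++ ['0']) else l

def pvPadTo7 (l : List Char) : List Char := pvPadTo7F 7 l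

def getArrete (piece numArrete : Int) : Int :=
  if numArrete = 4 then
    let mask : Int := 2 ^ 4 - 1                               -- (1 << 4) - 1
    let firstBit := PySem.Int.floordiv piece (2 ^ 15)         -- piece >> 15
    let res := PySem.Int.mod piece (mask + 1)                 -- piece & mask  (mask = 2^4 - 1)
    res * 2 + firstBit                                        -- (res << 1) + firstBit
  else
    let masque : Int := 2 ^ (4 + 4 * (4 - numArrete)).toNat - 1
    -- (piece & masque) >> (4*(4-numArrete) - 1)   (masque = 2^k - 1)
    PySem.Int.floordiv (PySem.Int.mod piece (masque + 1)) (2 ^ (4 * (4 - numArrete) - 1).toNat)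

-- loop body of flipPiece's 'for edge in edges' (none = the ValueError from int(…, 2))
def pvFlipStep (acc : Option (List Int)) (edge : Int) : Option (List Int) :=
  match acc with
  | none => none
  | some fl =>
    let bs := pvBin edge
    -- for i in range(len(bin(edge))-1, 1, -1): reversedArrete.append(bin(edge)[i])  (index always in range)
    let revd := (PySem.List.pyRange ((bs.length : Int) - 1) 1 (-1)).foldl
        (fun l i => l ++ [PySem.List.pyGetD bs i ' ']) ['0', 'b']
    let padded := pvPadTo7 revd
    match pvParseBin (padded.drop 2) with
    | none => none
    | some v => some (fl ++ [v])

def flipPiece (edges : List Int) : Option (List Int) :=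
  match edges.foldl pvFlipStep (some []) with
  | none => none
  | some fl =>
    -- flippedEdges[0], flippedEdges[2] = flippedEdges[2], flippedEdges[0]  (indices always in range)
    let a := PySem.List.pyGetD fl 0 0
    let c := PySem.List.pyGetD fl 2 0
    some ((fl.set 0 c).set 2 a)

def getEdges (piece : Int) : Option (List Int) :=
  let arretes := (PySem.List.pyRange 1 5 1).foldl (fun l i => l ++ [getArrete piece i]) []
  match flipPiece arretes with
  | none => none
  | some fp => some (arretes ++ fp.foldl (fun l i => l ++ [i]) [])

-- loop body of flipPieceInPlace's 'for i in flippedEdges'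
def pvAppendEdge (l : List Char) (i : Int) : List Char :=
  let s := pvBinRep i
  -- for j in range(len(bin(i).replace("0b","")), 5): flippedPiece.append("0")
  let l := (PySem.List.pyRange (s.length : Int) 5 1).foldl (fun l _ => l ++ ['0']) l
  -- for j in bin(i).replace("0b",""): flippedPiece.append(j)
  let l := s.foldl (fun l j => l ++ [j]) l
  l.dropLast                                                  -- flippedPiece.pop() (list never empty here)

def pvFlipCore (piece : Int) : Option Int :=
  match getEdges piece with
  | none => none
  | some es =>
    let flippedEdges := PySem.List.slice es (some 4) none     -- getEdges(piece)[4:]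
    let fp := flippedEdges.foldl pvAppendEdge []
    pvParseBin fp                                             -- int("".join(flippedPiece), 2)

def flipPieceInPlace (piece : Int) : Int := (pvFlipCore piece).getD 0
  -- none = the Python raises ValueError; those inputs are excluded by Pre_, the default is never used there

-- ===== PORT B =====
-- _rev5(e): r = 0; for _ in range(5): r = r*2 + e % 2; e //= 2
def pvRev5 (e : Int) : Int :=
  ((PySem.List.pyRange 0 5 1).foldl
    (fun (p : Int × Int) _ => (p.1 * 2 + PySem.Int.mod p.2 2, PySem.Int.floordiv p.2 2)) (0, e)).1

def flipPieceInPlace_alt (piece : Int) : Int :=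
  let top := PySem.Int.floordiv (PySem.Int.mod piece 65536) 2048
  let right := PySem.Int.floordiv (PySem.Int.mod piece 4096) 128
  let bottom := PySem.Int.floordiv (PySem.Int.mod piece 256) 8
  let left := PySem.Int.mod piece 16 * 2 + PySem.Int.floordiv piece 32768
  let flipped := [pvRev5 bottom, pvRev5 right, pvRev5 top, pvRev5 left]
  flipped.foldl (fun out r => out * 16 + PySem.Int.floordiv r 2) 0

-- ===== PRECONDITION & SPEC =====
-- Pre_ admits exactly the pieces whose fourth edge 2*(piece%16) + piece//32768 is a 5-bit
-- value, as in the 16-bit cube format.  Below 0 A raises ValueError (bin() puts 'b' and '-'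
-- among the digits int(…, 2) parses); at 32 or more (pieces wider than 16 bits) the format
-- fixes no width for the edge reversal — A reverses the edge at its actual bit-length, B at
-- the format's 5 bits, and either choice is as defensible as the other, so those pieces are
-- excluded.  (% and / are Lean's emod/ediv, which agree with Python's for these divisors.)
def Pre_flipPieceInPlace (piece : Int) : Prop :=
  0 ≤ piece % 16 * 2 + piece / 32768 ∧ piece % 16 * 2 + piece / 32768 < 32
instance (piece : Int) : Decidable (Pre_flipPieceInPlace piece) := by
  unfold Pre_flipPieceInPlace; infer_instance
def pvWitness_flipPieceInPlace : Int := 4660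

def Spec_flipPieceInPlace (piece : Int) (out : Int) : Prop := out = flipPieceInPlace_alt piece
instance (piece : Int) (out : Int) : Decidable (Spec_flipPieceInPlace piece out) := by
  unfold Spec_flipPieceInPlace; infer_instance

-- ===== CLAIM (what is proved, stated in full; the proofs are below) =====
def Claim_equal_flipPieceInPlace : Prop := ∀ (piece : Int), Dom_flipPieceInPlace piece → Pre_flipPieceInPlace piece → Spec_flipPieceInPlace piece (flipPieceInPlace piece)

-- ===== LEMMAS AND PROOFS =====

-- fuel congruence: any fuel ≥ n computes the same digits
theorem pvBinDigitsF_congr : ∀ (n f g : Nat), n ≤ f → n ≤ g → pvBinDigitsF f n = pvBinDigitsF g n := by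
  intro n
  induction n using Nat.strong_induction_on with
  | _ n ih =>
    intro f g hf hg
    match f, g, n with
    | f, g, 0 => cases f <;> cases g <;> simp [pvBinDigitsF]
    | f + 1, g + 1, n + 1 =>
      show (if n + 1 = 0 then [] else pvBinDigitsF f ((n + 1) / 2) ++ _)
          = (if n + 1 = 0 then [] else pvBinDigitsF g ((n + 1) / 2) ++ _)
      rw [if_neg (Nat.succ_ne_zero n), if_neg (Nat.succ_ne_zero n),
        ih ((n + 1) / 2) (by omega) f g (by omega) (by omega)]

theorem pvBinDigits_eq (n : Nat) :
    pvBinDigits n = if n = 0 then [] else pvBinDigits (n / 2) ++ [if n % 2 = 1 then '1' else '0'] := by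
  by_cases h : n = 0
  · simp [h, pvBinDigits, pvBinDigitsF]
  · match n, h with
    | n + 1, h =>
      rw [if_neg h]
      show (if n + 1 = 0 then [] else pvBinDigitsF n ((n + 1) / 2) ++ _) = _
      rw [if_neg h, pvBinDigitsF_congr ((n + 1) / 2) n ((n + 1) / 2) (by omega) (by omega)]
      rfl

-- Nat-level bit reversal: revN e k acc reverses the low k bits of e onto acc.
def revN : Nat → Nat → Nat → Nat
  | _, 0, acc => acc
  | e, k + 1, acc => revN (e / 2) k (2 * acc + e % 2)

-- the flipped value of one edge e ≥ 0: its bits reversed within max 5 (bit-length) bits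
def pvRNat (e : Nat) : Nat := revN e (max 5 (pvBinDigits e).length) 0

-- bin(E).drop 2 for a Nat E, bin(i).replace("0b","") for a Nat value, and the block of chars
-- (4 or more) one edge contributes to flippedPiece
def pvDD (E : Nat) : List Char := if E = 0 then ['0'] else pvBinDigits E
def pvRep (r : Nat) : List Char := if r = 0 then ['0'] else pvBinDigits r
def pvBlk (r : Nat) : List Char :=
  (List.replicate (5 - (pvRep r).length) '0' ++ pvRep r).dropLast
def pvOK (l : List Char) : Prop := l.all (fun c => c == '0' || c == '1') = true

theorem pvBitVal_foldl (l : List Char) (a : Nat) :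
    l.foldl (fun a c => 2 * a + (if c = '1' then 1 else 0)) a = a * 2 ^ l.length + pvBitVal l := by
  induction l generalizing a with
  | nil => show a = a * 2 ^ 0 + 0; ring
  | cons c t ih =>
    have h1 : pvBitVal (c :: t)
        = t.foldl (fun a c => 2 * a + (if c = '1' then 1 else 0))
            (2 * 0 + (if c = '1' then 1 else 0)) := rfl
    rw [List.foldl_cons, ih, h1, ih, List.length_cons]
    ring

theorem pvBitVal_append (l m : List Char) :
    pvBitVal (l ++ m) = pvBitVal l * 2 ^ m.length + pvBitVal m := by
  unfold pvBitVal
  rw [List.foldl_append, pvBitVal_foldl]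
  rfl

theorem pvBitVal_singleton (c : Char) : pvBitVal [c] = if c = '1' then 1 else 0 := by
  simp [pvBitVal]

theorem pvBitVal_replicate_zero (k : Nat) : pvBitVal (List.replicate k '0') = 0 := by
  induction k with
  | zero => rfl
  | succ n ih =>
    rw [show List.replicate (n+1) '0' = List.replicate n '0' ++ ['0'] from by
      rw [← List.replicate_succ']]
    rw [pvBitVal_append, ih, pvBitVal_singleton]
    simp

theorem pvBinDigits_ok (n : Nat) : pvOK (pvBinDigits n) := by
  induction n using Nat.strong_induction_on with
  | _ n ih =>
    rw [pvBinDigits_eq]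
    by_cases h : n = 0
    · simp [h, pvOK]
    · rw [if_neg h]
      have := ih (n / 2) (Nat.div_lt_self (Nat.pos_of_ne_zero h) (by omega))
      simp only [pvOK, List.all_append] at *
      simp [this]
      omega

theorem pvBitVal_binDigits (n : Nat) : pvBitVal (pvBinDigits n) = n := by
  induction n using Nat.strong_induction_on with
  | _ n ih =>
    rw [pvBinDigits_eq]
    by_cases h : n = 0
    · simp [h, pvBitVal]
    · rw [if_neg h]
      rw [pvBitVal_append, ih (n / 2) (Nat.div_lt_self (Nat.pos_of_ne_zero h) (by omega)),
        pvBitVal_singleton]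
      simp only [List.length_singleton, pow_one]
      have := Nat.div_add_mod n 2
      rcases Nat.mod_two_eq_zero_or_one n with h2 | h2 <;> simp [h2] <;> omega

theorem pvBinDigits_lt (n : Nat) : n < 2 ^ (pvBinDigits n).length := by
  induction n using Nat.strong_induction_on with
  | _ n ih =>
    rw [pvBinDigits_eq]
    by_cases h : n = 0
    · simp [h]
    · rw [if_neg h]
      have := ih (n / 2) (Nat.div_lt_self (Nat.pos_of_ne_zero h) (by omega))
      simp only [List.length_append, List.length_singleton]
      rw [pow_succ]
      have h2 := Nat.mod_lt n (show 0 < 2 by omega)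
      have h3 := Nat.div_add_mod n 2
      omega

theorem pvBinDigits_len_le (n : Nat) : ∀ (k : Nat), n < 2 ^ k → (pvBinDigits n).length ≤ k := by
  induction n using Nat.strong_induction_on with
  | _ n ih =>
    intro k h
    rw [pvBinDigits_eq]
    by_cases h0 : n = 0
    · simp [h0]
    · rw [if_neg h0]
      simp only [List.length_append, List.length_singleton]
      cases k with
      | zero => omega
      | succ k =>
        have : (pvBinDigits (n / 2)).length ≤ k := by
          apply ih (n / 2) (Nat.div_lt_self (Nat.pos_of_ne_zero h0) (by omega))
          rw [pow_succ] at h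
          omega
        omega

theorem pvBinDigits_ne_nil (n : Nat) (h : n ≠ 0) : pvBinDigits n ≠ [] := by
  rw [pvBinDigits_eq]
  simp [h]

theorem revN_acc (k : Nat) : ∀ e acc, revN e k acc = acc * 2 ^ k + revN e k 0 := by
  induction k with
  | zero => intro e acc; simp [revN]
  | succ k ih =>
    intro e acc
    rw [revN, revN, ih, ih (e / 2) (2 * 0 + e % 2)]
    ring

theorem revN_succ_zero (e L : Nat) : revN e (L + 1) 0 = (e % 2) * 2 ^ L + revN (e / 2) L 0 := by
  rw [revN, revN_acc]
  ring

theorem revN_zero (k : Nat) : ∀ acc, revN 0 k acc = acc * 2 ^ k := by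
  induction k with
  | zero => intro acc; simp [revN]
  | succ k ih =>
    intro acc
    rw [revN]
    simp only [Nat.zero_div, Nat.zero_mod]
    rw [ih]
    ring

theorem revN_lt (k : Nat) : ∀ e, revN e k 0 < 2 ^ k := by
  induction k with
  | zero => intro e; simp [revN]
  | succ k ih =>
    intro e
    rw [revN, revN_acc]
    have := ih (e / 2)
    have h2 := Nat.mod_lt e (show 0 < 2 by omega)
    rw [pow_succ]
    nlinarith [Nat.one_le_two_pow (n := k)]

theorem revN_pad (k : Nat) : ∀ j e, e < 2 ^ k → revN e (k + j) 0 = revN e k 0 * 2 ^ j := by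
  induction k with
  | zero =>
    intro j e he
    have : e = 0 := by omega
    subst this
    rw [revN_zero, revN_zero]
    simp
  | succ k ih =>
    intro j e he
    rw [show k + 1 + j = (k + j) + 1 from by omega, revN_succ_zero, revN_succ_zero,
      ih j (e / 2) (by rw [pow_succ] at he; omega), pow_add]
    ring

theorem pvBitVal_rev_binDigits (n : Nat) :
    pvBitVal (pvBinDigits n).reverse = revN n (pvBinDigits n).length 0 := by
  induction n using Nat.strong_induction_on with
  | _ n ih =>
    rw [pvBinDigits_eq]
    by_cases h : n = 0
    · simp [h, pvBitVal, revN]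
    · rw [if_neg h]
      simp only [List.reverse_append, List.reverse_singleton,
        List.length_append, List.length_singleton, List.singleton_append]
      rw [show ((if n % 2 = 1 then '1' else '0') :: (pvBinDigits (n / 2)).reverse)
            = [if n % 2 = 1 then '1' else '0'] ++ (pvBinDigits (n / 2)).reverse from rfl]
      rw [pvBitVal_append, pvBitVal_singleton,
        ih (n / 2) (Nat.div_lt_self (Nat.pos_of_ne_zero h) (by omega)), revN_succ_zero]
      simp only [List.length_reverse]
      rcases Nat.mod_two_eq_zero_or_one n with h2 | h2 <;> simp [h2]

theorem pvPadTo7F_eq : ∀ (f : Nat) (l : List Char), 7 - l.length ≤ f →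
    pvPadTo7F f l = l ++ List.replicate (7 - l.length) '0' := by
  intro f
  induction f with
  | zero =>
    intro l h
    have : 7 - l.length = 0 := by omega
    simp [pvPadTo7F, this]
  | succ f ih =>
    intro l h
    rw [pvPadTo7F]
    split_ifs with hl
    · rw [ih (l ++ ['0']) (by simp; omega)]
      simp only [List.length_append, List.length_singleton, List.append_assoc,
        List.singleton_append]
      rw [show 7 - l.length = (7 - (l.length + 1)) + 1 from by omega, List.replicate_succ]
    · have : 7 - l.length = 0 := by omega
      simp [this]

theorem pvPadTo7_eq (l : List Char) : pvPadTo7 l = l ++ List.replicate (7 - l.length) '0' := by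
  exact pvPadTo7F_eq 7 l (by omega)

-- the reversal loop of flipPiece, for any bs with at least the '0b' prefix
theorem pvRevLoop (bs : List Char) (init : List Char) (h : 2 ≤ bs.length) :
    (PySem.List.pyRange ((bs.length : Int) - 1) 1 (-1)).foldl
        (fun l i => l ++ [PySem.List.pyGetD bs i ' ']) init
      = init ++ (bs.drop 2).reverse := by
  rw [PySem.List.pyRange_neg_one_eq_reverse,
    PySem.List.foldl_append_singleton_eq_map (f := fun i => PySem.List.pyGetD bs i ' '),
    List.map_reverse]
  have hmap := PySem.List.map_pyGetD_pyRange' bs ' ' (a := 2) (by norm_num)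
  rw [show ((bs.length : Int) - 1 + 1) = (bs.length : Int) from by ring,
    show ((1 : Int) + 1) = (2 : Int) from by norm_num, hmap]
  rfl

theorem pvParseBin_ok (l : List Char) (h : l ≠ []) (hok : pvOK l) :
    pvParseBin l = some ((pvBitVal l : Int)) := by
  rw [pvParseBin, if_pos ⟨h, hok⟩]

theorem pvOK_append (l m : List Char) (hl : pvOK l) (hm : pvOK m) : pvOK (l ++ m) := by
  simp [pvOK, List.all_append] at *
  exact ⟨hl, hm⟩

theorem pvOK_replicate (k : Nat) : pvOK (List.replicate k '0') := by
  simp [pvOK]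

theorem pvOK_reverse (l : List Char) (h : pvOK l) : pvOK l.reverse := by
  simp [pvOK] at *
  intro c hc
  exact h c hc

theorem pvOK_DD (E : Nat) : pvOK (pvDD E) := by
  rw [pvDD]
  split
  · simp [pvOK]
  · exact pvBinDigits_ok E

theorem pvOK_rep (r : Nat) : pvOK (pvRep r) := by
  rw [pvRep]
  split
  · simp [pvOK]
  · exact pvBinDigits_ok r

theorem pvOK_dropLast (l : List Char) (h : pvOK l) : pvOK l.dropLast := by
  simp [pvOK] at *
  intro c hc
  exact h c (List.dropLast_sublist l |>.mem hc)

theorem pvDD_ne_nil (E : Nat) : pvDD E ≠ [] := by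
  rw [pvDD]
  split
  · simp
  · exact pvBinDigits_ne_nil E (by assumption)

theorem pvRep_ne_nil (r : Nat) : pvRep r ≠ [] := by
  rw [pvRep]
  split
  · simp
  · exact pvBinDigits_ne_nil r (by assumption)

theorem pvBin_natCast (E : Nat) : pvBin ((E : Nat) : Int) = '0' :: 'b' :: pvDD E := by
  rw [pvBin, pvDD, if_neg (not_lt.mpr (Int.natCast_nonneg E))]
  by_cases h : E = 0
  · subst h; norm_num
  · rw [if_neg (by exact_mod_cast h), if_neg h, Int.toNat_natCast]

theorem pvBinRep_natCast (r : Nat) : pvBinRep ((r : Nat) : Int) = pvRep r := by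
  rw [pvBinRep, pvRep, if_neg (not_lt.mpr (Int.natCast_nonneg r))]
  by_cases h : r = 0
  · subst h; norm_num
  · rw [if_neg (by exact_mod_cast h), if_neg h, Int.toNat_natCast]

theorem pv_dropLast_append (l m : List Char) (h : m ≠ []) :
    (l ++ m).dropLast = l ++ m.dropLast := by
  rcases List.eq_nil_or_concat m with rfl | ⟨Y, c, rfl⟩
  · simp at h
  · simp only [List.concat_eq_append, ← List.append_assoc, List.dropLast_concat]

theorem pvBitVal_dropLast (l : List Char) (h : l ≠ []) :
    pvBitVal l.dropLast = pvBitVal l / 2 := by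
  rcases List.eq_nil_or_concat l with rfl | ⟨Y, c, rfl⟩
  · simp at h
  · simp only [List.concat_eq_append, List.dropLast_concat, pvBitVal_append,
      pvBitVal_singleton, List.length_singleton, pow_one]
    split <;> omega

theorem pvRep_val (r : Nat) : pvBitVal (pvRep r) = r := by
  rw [pvRep]
  split
  · simp_all [pvBitVal_singleton]
  · exact pvBitVal_binDigits r

theorem pvRep_len_max (r : Nat) : (pvRep r).length = max 1 (pvBinDigits r).length := by
  rw [pvRep]
  split
  · simp_all [pvBinDigits, pvBinDigitsF]
  · have h := pvBinDigits_ne_nil r (by assumption)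
    have : (pvBinDigits r).length ≠ 0 := by simpa [List.length_eq_zero_iff] using h
    omega

theorem pvBlk_len (r : Nat) : (pvBlk r).length = max 5 (pvBinDigits r).length - 1 := by
  rw [pvBlk, List.length_dropLast, List.length_append, List.length_replicate, pvRep_len_max]
  omega

theorem pvBlk_val (r : Nat) : pvBitVal (pvBlk r) = r / 2 := by
  rw [pvBlk, pvBitVal_dropLast _ (by
    simp only [ne_eq, List.append_eq_nil_iff, not_and]
    intro _
    exact pvRep_ne_nil r)]
  rw [pvBitVal_append, pvBitVal_replicate_zero, pvRep_val]
  simp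

theorem pvBlk_ok (r : Nat) : pvOK (pvBlk r) := by
  exact pvOK_dropLast _ (pvOK_append _ _ (pvOK_replicate _) (pvOK_rep r))

theorem pvBlk_ne_nil (r : Nat) : pvBlk r ≠ [] := by
  have h := pvBlk_len r
  intro hc
  rw [hc] at h
  simp at h
  omega

-- the value one reversed edge gets in flipPiece
theorem pvDD_val (E : Nat) :
    pvBitVal (pvDD E).reverse * 2 ^ (5 - (pvDD E).length) = pvRNat E := by
  rw [pvDD, pvRNat]
  split_ifs with h
  · subst h
    rw [show pvBinDigits 0 = [] from rfl]
    simp [revN_zero, pvBitVal]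
  · rw [pvBitVal_rev_binDigits]
    by_cases hL : (pvBinDigits E).length ≤ 5
    · rw [show max 5 (pvBinDigits E).length
            = (pvBinDigits E).length + (5 - (pvBinDigits E).length) from by omega,
        revN_pad _ _ _ (pvBinDigits_lt E)]
    · rw [show 5 - (pvBinDigits E).length = 0 from by omega,
        show max 5 (pvBinDigits E).length = (pvBinDigits E).length from by omega]
      simp

-- one step of flipPiece's edge loop on a nonnegative edge
theorem pvFlipStep_nat (fl : List Int) (E : Nat) :
    pvFlipStep (some fl) ((E : Nat) : Int) = some (fl ++ [((pvRNat E : Nat) : Int)]) := by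
  rw [pvFlipStep, pvBin_natCast]
  have hlen : 2 ≤ ('0' :: 'b' :: pvDD E).length := by simp
  rw [pvRevLoop _ _ hlen]
  simp only [List.drop_succ_cons, List.drop_zero]
  rw [show (['0', 'b'] ++ (pvDD E).reverse) = '0' :: 'b' :: (pvDD E).reverse from rfl,
    pvPadTo7_eq]
  simp only [List.length_cons, List.length_reverse]
  rw [show ('0' :: 'b' :: (pvDD E).reverse ++ List.replicate (7 - ((pvDD E).length + 1 + 1)) '0')
        = '0' :: 'b' :: ((pvDD E).reverse ++ List.replicate (5 - (pvDD E).length) '0') from by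
      rw [show 7 - ((pvDD E).length + 1 + 1) = 5 - (pvDD E).length from by omega]
      simp]
  simp only [List.drop_succ_cons, List.drop_zero]
  rw [pvParseBin_ok _ (by
      simp only [ne_eq, List.append_eq_nil_iff, not_and, List.reverse_eq_nil_iff]
      intro hc
      exact absurd hc (pvDD_ne_nil E))
    (pvOK_append _ _ (pvOK_reverse _ (pvOK_DD E)) (pvOK_replicate _))]
  rw [pvBitVal_append, pvBitVal_replicate_zero, List.length_replicate, pvDD_val]
  simp

-- one step of flipPieceInPlace's char loop on a nonnegative value
theorem pvAppendEdge_nat (l : List Char) (r : Nat) :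
    pvAppendEdge l ((r : Nat) : Int) = l ++ pvBlk r := by
  rw [pvAppendEdge, pvBinRep_natCast]
  rw [PySem.List.foldl_append_singleton_eq_map (f := fun _ => '0'), List.map_const',
    PySem.List.length_pyRange_one, PySem.List.foldl_append_singleton_eq_self]
  rw [show ((5 : Int) - ((pvRep r).length : Int)).toNat = 5 - (pvRep r).length from by omega]
  rw [List.append_assoc, pv_dropLast_append _ _ (by
    simp only [ne_eq, List.append_eq_nil_iff, not_and]
    intro _
    exact pvRep_ne_nil r)]
  rw [pvBlk]

theorem pvRev_aux (lst : List Int) : ∀ (E acc : Nat),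
    lst.foldl (fun (p : Int × Int) _ => (p.1 * 2 + PySem.Int.mod p.2 2, PySem.Int.floordiv p.2 2))
        (((acc : Nat) : Int), ((E : Nat) : Int))
      = (((revN E lst.length acc : Nat) : Int), ((E / 2 ^ lst.length : Nat) : Int)) := by
  induction lst with
  | nil => intro E acc; simp [revN]
  | cons x t ih =>
    intro E acc
    simp only [List.foldl_cons, List.length_cons]
    have hstep : ((acc : Int) * 2 + PySem.Int.mod (E : Int) 2, PySem.Int.floordiv (E : Int) 2)
        = (((2 * acc + E % 2 : Nat) : Int), ((E / 2 : Nat) : Int)) := by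
      rw [PySem.Int.mod_eq_emod_of_pos (by norm_num),
        PySem.Int.floordiv_eq_ediv_of_pos (by norm_num)]
      simp only [Prod.mk.injEq]
      constructor
      · push_cast; omega
      · omega
    rw [hstep, ih]
    simp only [Prod.mk.injEq]
    refine ⟨rfl, ?_⟩
    rw [Nat.div_div_eq_div_mul, pow_succ, Nat.mul_comm 2 (2 ^ t.length)]

theorem pvRev5_nat (E : Nat) : pvRev5 ((E : Nat) : Int) = ((revN E 5 0 : Nat) : Int) := by
  rw [pvRev5, show ((0 : Int)) = ((0 : Nat) : Int) from by norm_num, pvRev_aux]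
  simp [PySem.List.length_pyRange_one]

theorem getArrete_one (piece : Int) :
    getArrete piece 1 = PySem.Int.floordiv (PySem.Int.mod piece 65536) 2048 := by
  norm_num [getArrete]
  rw [show ((16:Int)).toNat = 16 from rfl, show ((11:Int)).toNat = 11 from rfl]
  norm_num

theorem getArrete_two (piece : Int) :
    getArrete piece 2 = PySem.Int.floordiv (PySem.Int.mod piece 4096) 128 := by
  norm_num [getArrete]
  rw [show ((12:Int)).toNat = 12 from rfl, show ((7:Int)).toNat = 7 from rfl]
  norm_num

theorem getArrete_three (piece : Int) :
    getArrete piece 3 = PySem.Int.floordiv (PySem.Int.mod piece 256) 8 := by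
  norm_num [getArrete]
  rw [show ((8:Int)).toNat = 8 from rfl, show ((3:Int)).toNat = 3 from rfl]
  norm_num

theorem getArrete_four (piece : Int) :
    getArrete piece 4 = PySem.Int.mod piece 16 * 2 + PySem.Int.floordiv piece 32768 := by
  norm_num [getArrete]

-- ===== VERDICT (by name: the statement is the Claim_ definition above) =====
set_option maxHeartbeats 2000000 in
theorem flipPieceInPlace_spec : Claim_equal_flipPieceInPlace := by
  unfold Claim_equal_flipPieceInPlace
  intro piece _ hpre
  unfold Spec_flipPieceInPlace
  unfold Pre_flipPieceInPlace at hpre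
  obtain ⟨hpre, hnd⟩ := hpre
  -- the four (nonnegative) edges as naturals
  have hnn : ∀ (m d : Int), 0 < m → 0 < d →
      0 ≤ PySem.Int.floordiv (PySem.Int.mod piece m) d := by
    intro m d hm hd
    rw [PySem.Int.floordiv_eq_ediv_of_pos hd]
    exact Int.ediv_nonneg (PySem.Int.mod_nonneg _ hm) (by omega)
  obtain ⟨E1, h1⟩ := Int.eq_ofNat_of_zero_le (hnn 65536 2048 (by norm_num) (by norm_num))
  obtain ⟨E2, h2⟩ := Int.eq_ofNat_of_zero_le (hnn 4096 128 (by norm_num) (by norm_num))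
  obtain ⟨E3, h3⟩ := Int.eq_ofNat_of_zero_le (hnn 256 8 (by norm_num) (by norm_num))
  have hconv : PySem.Int.mod piece 16 * 2 + PySem.Int.floordiv piece 32768
      = piece % 16 * 2 + piece / 32768 := by
    rw [PySem.Int.mod_eq_emod_of_pos (by norm_num : (0:Int) < 16),
      PySem.Int.floordiv_eq_ediv_of_pos (by norm_num : (0:Int) < 32768)]
  obtain ⟨E4, h4⟩ := Int.eq_ofNat_of_zero_le (by rw [hconv]; exact hpre :
    0 ≤ PySem.Int.mod piece 16 * 2 + PySem.Int.floordiv piece 32768)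
  have hE1 : E1 < 32 := by
    have hlt := PySem.Int.mod_lt piece (show (0:Int) < 65536 by norm_num)
    have hge := PySem.Int.mod_nonneg piece (show (0:Int) < 65536 by norm_num)
    have h1' := h1
    rw [PySem.Int.floordiv_eq_ediv_of_pos (by norm_num : (0:Int) < 2048)] at h1'
    omega
  have hE2 : E2 < 32 := by
    have hlt := PySem.Int.mod_lt piece (show (0:Int) < 4096 by norm_num)
    have hge := PySem.Int.mod_nonneg piece (show (0:Int) < 4096 by norm_num)
    have h2' := h2
    rw [PySem.Int.floordiv_eq_ediv_of_pos (by norm_num : (0:Int) < 128)] at h2'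
    omega
  have hE3 : E3 < 32 := by
    have hlt := PySem.Int.mod_lt piece (show (0:Int) < 256 by norm_num)
    have hge := PySem.Int.mod_nonneg piece (show (0:Int) < 256 by norm_num)
    have h3' := h3
    rw [PySem.Int.floordiv_eq_ediv_of_pos (by norm_num : (0:Int) < 8)] at h3'
    omega
  have hE4 : E4 < 32 := by
    rw [hconv] at h4
    rw [h4] at hnd
    omega
  have hR5 : ∀ (E : Nat), E < 32 → pvRNat E = revN E 5 0 := by
    intro E hE
    rw [pvRNat, show max 5 (pvBinDigits E).length = 5 from by
      have := pvBinDigits_len_le E 5 (by omega)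
      omega]
  have hRlen : ∀ (E : Nat), E < 32 → (pvBlk (pvRNat E)).length = 4 := by
    intro E hE
    have hlt : pvRNat E < 32 := by
      rw [hR5 E hE]
      exact revN_lt 5 E
    rw [pvBlk_len, show max 5 (pvBinDigits (pvRNat E)).length = 5 from by
      have := pvBinDigits_len_le (pvRNat E) 5 (by omega)
      omega]
  -- evaluate port A
  have harr : (PySem.List.pyRange 1 5 1).foldl (fun l i => l ++ [getArrete piece i]) []
      = [((E1 : Nat) : Int), ((E2 : Nat) : Int), ((E3 : Nat) : Int), ((E4 : Nat) : Int)] := by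
    rw [show PySem.List.pyRange 1 5 1 = [1, 2, 3, 4] from by decide]
    simp only [List.foldl_cons, List.foldl_nil]
    rw [getArrete_one, getArrete_two, getArrete_three, getArrete_four, h1, h2, h3, h4]
    rfl
  have hfold : List.foldl pvFlipStep (some [])
        [((E1 : Nat) : Int), ((E2 : Nat) : Int), ((E3 : Nat) : Int), ((E4 : Nat) : Int)]
      = some [((pvRNat E1 : Nat) : Int), ((pvRNat E2 : Nat) : Int),
          ((pvRNat E3 : Nat) : Int), ((pvRNat E4 : Nat) : Int)] := by
    simp only [List.foldl_cons, List.foldl_nil, pvFlipStep_nat]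
    rfl
  have hswap : flipPiece [((E1 : Nat) : Int), ((E2 : Nat) : Int), ((E3 : Nat) : Int),
        ((E4 : Nat) : Int)]
      = some [((pvRNat E3 : Nat) : Int), ((pvRNat E2 : Nat) : Int),
          ((pvRNat E1 : Nat) : Int), ((pvRNat E4 : Nat) : Int)] := by
    rw [flipPiece, hfold]
    rfl
  have hedges : getEdges piece = some [((E1 : Nat) : Int), ((E2 : Nat) : Int),
      ((E3 : Nat) : Int), ((E4 : Nat) : Int), ((pvRNat E3 : Nat) : Int),
      ((pvRNat E2 : Nat) : Int), ((pvRNat E1 : Nat) : Int), ((pvRNat E4 : Nat) : Int)] := by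
    show (match flipPiece ((PySem.List.pyRange 1 5 1).foldl
          (fun l i => l ++ [getArrete piece i]) []) with
      | none => none
      | some fp => some ((PySem.List.pyRange 1 5 1).foldl
          (fun l i => l ++ [getArrete piece i]) [] ++ fp.foldl (fun l i => l ++ [i]) [])) = _
    rw [harr, hswap]
    rfl
  have hcore : pvFlipCore piece
      = pvParseBin (((pvBlk (pvRNat E3) ++ pvBlk (pvRNat E2)) ++ pvBlk (pvRNat E1))
          ++ pvBlk (pvRNat E4)) := by
    show (match getEdges piece with
      | none => none
      | some es => pvParseBin ((PySem.List.slice es (some 4) none).foldl pvAppendEdge [])) = _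
    rw [hedges]
    show pvParseBin (List.foldl pvAppendEdge []
      (PySem.List.slice [((E1 : Nat) : Int), ((E2 : Nat) : Int), ((E3 : Nat) : Int),
        ((E4 : Nat) : Int), ((pvRNat E3 : Nat) : Int), ((pvRNat E2 : Nat) : Int),
        ((pvRNat E1 : Nat) : Int), ((pvRNat E4 : Nat) : Int)] (some 4) none)) = _
    rw [show (4 : Int) = ((4 : Nat) : Int) from by norm_num, PySem.List.slice_from_natCast]
    simp only [List.drop_succ_cons, List.drop_zero, List.foldl_cons, List.foldl_nil,
      pvAppendEdge_nat, List.nil_append]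
  -- A's final value (all four blocks are 4 bits long since every edge is < 32 here)
  have hval : pvBitVal (((pvBlk (pvRNat E3) ++ pvBlk (pvRNat E2)) ++ pvBlk (pvRNat E1))
        ++ pvBlk (pvRNat E4))
      = ((pvRNat E3 / 2 * 16 + pvRNat E2 / 2) * 16 + pvRNat E1 / 2) * 16 + pvRNat E4 / 2 := by
    rw [pvBitVal_append, pvBitVal_append, pvBitVal_append,
      pvBlk_val, pvBlk_val, pvBlk_val, pvBlk_val, hRlen E1 hE1, hRlen E2 hE2, hRlen E4 hE4]
    norm_num
  have hA : flipPieceInPlace piece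
      = ((((pvRNat E3 / 2 * 16 + pvRNat E2 / 2) * 16 + pvRNat E1 / 2) * 16
          + pvRNat E4 / 2 : Nat) : Int) := by
    rw [flipPieceInPlace, hcore, pvParseBin_ok _ (by
        simp only [ne_eq, List.append_eq_nil_iff, not_and]
        intro _
        exact pvBlk_ne_nil (pvRNat E4))
      (pvOK_append _ _ (pvOK_append _ _ (pvOK_append _ _ (pvBlk_ok _) (pvBlk_ok _))
        (pvBlk_ok _)) (pvBlk_ok _)), hval]
    rfl
  -- evaluate port B
  have hB : flipPieceInPlace_alt piece
      = ((((revN E3 5 0 / 2 * 16 + revN E2 5 0 / 2) * 16 + revN E1 5 0 / 2) * 16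
          + revN E4 5 0 / 2 : Nat) : Int) := by
    simp only [flipPieceInPlace_alt]
    rw [h1, h2, h3, h4, pvRev5_nat, pvRev5_nat, pvRev5_nat, pvRev5_nat]
    simp only [List.foldl_cons, List.foldl_nil]
    rw [show (2 : Int) = ((2 : Nat) : Int) from by norm_num]
    rw [PySem.Int.floordiv_natCast, PySem.Int.floordiv_natCast, PySem.Int.floordiv_natCast,
      PySem.Int.floordiv_natCast]
    push_cast
    ring
  rw [hA, hB, hR5 E1 hE1, hR5 E2 hE2, hR5 E3 hE3, hR5 E4 hE4]
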